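-- pv_equiv track=rewrite | github.com/ramirezfranco/AML-project | project/ngram_analysis.py | get_interest_revs
-- ===== SOURCE A (Python) =====
-- def get_interest_revs(reviews, rev_sent):
-- 	revs_classified = {k:{
-- 	'negative':[reviews[k][j] for j in range(len(rev_sent[k])) if rev_sent[k][j] < 2],
-- 	'neutral': [reviews[k][j] for j in range(len(rev_sent[k])) if rev_sent[k][j] == 2],
-- 	'positive':[reviews[k][j] for j in range(len(rev_sent[k])) if rev_sent[k][j] > 2]
-- 	}
-- 	for k in rev_sent.keys()}
-- 	return revs_classified
-- ===== SOURCE B (Python) =====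
-- def get_interest_revs(reviews, rev_sent):
--     revs_classified = {}
--     for k in rev_sent:
--         negative, neutral, positive = [], [], []
--         for j in range(len(rev_sent[k])):
--             s = rev_sent[k][j]
--             if s < 2:
--                 negative.append(reviews[k][j])
--             elif s == 2:
--                 neutral.append(reviews[k][j])
--             else:
--                 positive.append(reviews[k][j])
--         revs_classified[k] = {'negative': negative, 'neutral': neutral, 'positive': positive}
--     return revs_classified
-- ===== Notes on version B (the rewrite author's own statement) =====
-- stated objective: simpler
-- what changed: replaces the three independent filtering comprehensions per key (three scans of rev_sent[k]) with a single bucketing pass that appends each review to negative/neutral/positive as it goes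
import Mathlib
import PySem

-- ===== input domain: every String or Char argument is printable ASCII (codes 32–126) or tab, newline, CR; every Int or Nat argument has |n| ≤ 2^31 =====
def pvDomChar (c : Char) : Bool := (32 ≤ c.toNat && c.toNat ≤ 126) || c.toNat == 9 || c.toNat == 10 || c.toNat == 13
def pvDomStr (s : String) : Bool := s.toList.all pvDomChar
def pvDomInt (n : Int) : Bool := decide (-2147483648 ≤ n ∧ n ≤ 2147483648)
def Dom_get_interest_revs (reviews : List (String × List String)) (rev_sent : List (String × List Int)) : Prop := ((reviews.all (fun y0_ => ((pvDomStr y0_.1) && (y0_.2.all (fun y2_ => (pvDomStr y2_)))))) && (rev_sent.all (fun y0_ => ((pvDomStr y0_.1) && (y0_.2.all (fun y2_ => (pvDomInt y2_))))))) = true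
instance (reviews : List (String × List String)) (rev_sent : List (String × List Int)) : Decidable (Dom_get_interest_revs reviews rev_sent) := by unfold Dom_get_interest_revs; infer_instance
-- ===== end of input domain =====

-- B replaces A's three filtering comprehensions per key with a single bucketing pass (simpler decomposition, same result).

-- ===== PORT A =====
-- literal transliteration: dict comprehension over rev_sent.keys(); each inner list is
-- [reviews[k][j] for j in range(len(rev_sent[k])) if <cond>] = map-over-filter of the range.
-- pyGetD is Python-exact under Pre_ (KeyError/IndexError inputs are excluded by Pre_).
def get_interest_revs (reviews : List (String × List String)) (rev_sent : List (String × List Int)) : List (String × List (String × List String)) :=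
  let R := PySem.Dict.ofList reviews
  let S := PySem.Dict.ofList rev_sent
  (S.keys).map (fun k =>
    let sents := S.getD k []
    let revs := R.getD k []
    let js := PySem.List.pyRange 0 (PySem.List.len sents) 1
    (k, [("negative", (js.filter (fun j => decide (PySem.List.pyGetD sents j 0 < 2))).map (fun j => PySem.List.pyGetD revs j "")),
         ("neutral",  (js.filter (fun j => decide (PySem.List.pyGetD sents j 0 = 2))).map (fun j => PySem.List.pyGetD revs j "")),
         ("positive", (js.filter (fun j => decide (PySem.List.pyGetD sents j 0 > 2))).map (fun j => PySem.List.pyGetD revs j ""))]))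

-- ===== PORT B =====
-- one bucketing pass over j in range(len(rev_sent[k])), accumulating (negative, neutral, positive)
def pvBucket (sents : List Int) (revs : List String) : List String × List String × List String :=
  (PySem.List.pyRange 0 (PySem.List.len sents) 1).foldl
    (fun acc j =>
      let s := PySem.List.pyGetD sents j 0
      let r := PySem.List.pyGetD revs j ""
      if s < 2 then (acc.1 ++ [r], acc.2.1, acc.2.2)
      else if s = 2 then (acc.1, acc.2.1 ++ [r], acc.2.2)
      else (acc.1, acc.2.1, acc.2.2 ++ [r]))
    ([], [], [])

def get_interest_revs_alt (reviews : List (String × List String)) (rev_sent : List (String × List Int)) : List (String × List (String × List String)) :=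
  let R := PySem.Dict.ofList reviews
  let S := PySem.Dict.ofList rev_sent
  (S.keys).map (fun k =>
    let b := pvBucket (S.getD k []) (R.getD k [])
    (k, [("negative", b.1), ("neutral", b.2.1), ("positive", b.2.2)]))

-- ===== PRECONDITION & SPEC =====
-- Pre_ excludes exactly the inputs where Python A raises: a KeyError (a key of rev_sent with a
-- non-empty sentiment list missing from reviews) or an IndexError (rev_sent[k] longer than
-- reviews[k]); B raises there too.  (If rev_sent[k] is empty, reviews[k] is never accessed.)
def Pre_get_interest_revs (reviews : List (String × List String)) (rev_sent : List (String × List Int)) : Prop :=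
  ∀ p ∈ (PySem.Dict.ofList rev_sent).items,
    p.2 = [] ∨
    ((PySem.Dict.ofList reviews).contains p.1 = true ∧
     p.2.length ≤ ((PySem.Dict.ofList reviews).getD p.1 []).length)
instance (reviews : List (String × List String)) (rev_sent : List (String × List Int)) : Decidable (Pre_get_interest_revs reviews rev_sent) := by unfold Pre_get_interest_revs; infer_instance

def pvWitness_get_interest_revs : (List (String × List String)) × (List (String × List Int)) :=
  ([("a", ["good stuff", "bad stuff", "meh"])], [("a", [4, 0, 2])])

def Spec_get_interest_revs (reviews : List (String × List String)) (rev_sent : List (String × List Int)) (out : List (String × List (String × List String))) : Prop := out = get_interest_revs_alt reviews rev_sent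
instance (reviews : List (String × List String)) (rev_sent : List (String × List Int)) (out : List (String × List (String × List String))) : Decidable (Spec_get_interest_revs reviews rev_sent out) := by unfold Spec_get_interest_revs; infer_instance

-- ===== CLAIM (what is proved, stated in full; the proofs are below) =====
def Claim_equal_get_interest_revs : Prop := ∀ (reviews : List (String × List String)) (rev_sent : List (String × List Int)), Dom_get_interest_revs reviews rev_sent → Pre_get_interest_revs reviews rev_sent → Spec_get_interest_revs reviews rev_sent (get_interest_revs reviews rev_sent)

-- ===== LEMMAS AND PROOFS =====
-- the bucketing fold equals the three map-over-filter scans, for any index list and accumulator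
theorem pvBucket_foldl (sents : List Int) (revs : List String) (js : List Int)
    (acc : List String × List String × List String) :
    js.foldl
      (fun acc j =>
        let s := PySem.List.pyGetD sents j 0
        let r := PySem.List.pyGetD revs j ""
        if s < 2 then (acc.1 ++ [r], acc.2.1, acc.2.2)
        else if s = 2 then (acc.1, acc.2.1 ++ [r], acc.2.2)
        else (acc.1, acc.2.1, acc.2.2 ++ [r])) acc =
    (acc.1 ++ (js.filter (fun j => decide (PySem.List.pyGetD sents j 0 < 2))).map (fun j => PySem.List.pyGetD revs j ""),
     acc.2.1 ++ (js.filter (fun j => decide (PySem.List.pyGetD sents j 0 = 2))).map (fun j => PySem.List.pyGetD revs j ""),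
     acc.2.2 ++ (js.filter (fun j => decide (PySem.List.pyGetD sents j 0 > 2))).map (fun j => PySem.List.pyGetD revs j "")) := by
  induction js generalizing acc with
  | nil => simp
  | cons j js ih =>
    rw [List.foldl_cons, ih]
    by_cases h1 : PySem.List.pyGetD sents j 0 < 2
    · have ha : PySem.List.pyGetD sents j 0 ≤ 1 := by omega
      have h2 : ¬ PySem.List.pyGetD sents j 0 = 2 := by omega
      have hb : ¬ 2 < PySem.List.pyGetD sents j 0 := by omega
      simp [ha, h2, hb]
    · by_cases h2 : PySem.List.pyGetD sents j 0 = 2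
      · have hb : ¬ 2 < PySem.List.pyGetD sents j 0 := by omega
        simp [h2]
      · have ha : ¬ PySem.List.pyGetD sents j 0 ≤ 1 := by omega
        have hb : 2 < PySem.List.pyGetD sents j 0 := by omega
        simp [h1, ha, h2, hb]

theorem pvBucket_eq (sents : List Int) (revs : List String) :
    pvBucket sents revs =
    (((PySem.List.pyRange 0 (PySem.List.len sents) 1).filter (fun j => decide (PySem.List.pyGetD sents j 0 < 2))).map (fun j => PySem.List.pyGetD revs j ""),
     ((PySem.List.pyRange 0 (PySem.List.len sents) 1).filter (fun j => decide (PySem.List.pyGetD sents j 0 = 2))).map (fun j => PySem.List.pyGetD revs j ""),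
     ((PySem.List.pyRange 0 (PySem.List.len sents) 1).filter (fun j => decide (PySem.List.pyGetD sents j 0 > 2))).map (fun j => PySem.List.pyGetD revs j "")) := by
  unfold pvBucket
  rw [pvBucket_foldl]
  simp

-- ===== VERDICT (by name: the statement is the Claim_ definition above) =====
theorem get_interest_revs_spec : Claim_equal_get_interest_revs := by
  intro reviews rev_sent _ _
  unfold Spec_get_interest_revs get_interest_revs get_interest_revs_alt
  simp only [pvBucket_eq]
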